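-- pv_equiv track=rewrite | github.com/ehadsagency-ai/manus-cli | manus_cli/speckit/tasks.py | _extract_phases_from_plan
-- ===== SOURCE A (Python) =====
-- from typing import Dict, List, Optional, Tuple
--
-- def _extract_phases_from_plan(plan_content: str) -> List[Dict[str, str]]:
--     """Extract implementation phases from plan"""
--     phases = []
--     lines = plan_content.split("\n")
--     current_phase = None
--
--     for line in lines:
--         if "### Phase" in line or "### Step" in line:
--             if current_phase:
--                 phases.append(current_phase)
--             phase_name = line.replace("###", "").strip()
--             current_phase = {"name": phase_name, "description": ""}
--         elif current_phase and line.strip() and not line.startswith("#"):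
--             current_phase["description"] += line.strip() + " "
--
--     if current_phase:
--         phases.append(current_phase)
--
--     # If no phases found, create default phases
--     if not phases:
--         phases = [
--             {"name": "Phase 1: Foundation", "description": "Set up project structure and dependencies"},
--             {"name": "Phase 2: Core Implementation", "description": "Implement main features"},
--             {"name": "Phase 3: Testing & Polish", "description": "Add tests and refine"}
--         ]
--
--     return phases
-- ===== SOURCE B (Python) =====
-- def _extract_phases_from_plan(plan_content):
--     """Extract implementation phases from plan (grouping decomposition)."""
--     DEFAULT = [
--         {"name": "Phase 1: Foundation", "description": "Set up project structure and dependencies"},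
--         {"name": "Phase 2: Core Implementation", "description": "Implement main features"},
--         {"name": "Phase 3: Testing & Polish", "description": "Add tests and refine"},
--     ]
--
--     def is_header(line):
--         return "### Phase" in line or "### Step" in line
--
--     lines = plan_content.split("\n")
--     # drop the preamble before the first header
--     i = 0
--     while i < len(lines) and not is_header(lines[i]):
--         i += 1
--     lines = lines[i:]
--
--     phases = []
--     while lines:
--         header, rest = lines[0], lines[1:]
--         j = 0
--         while j < len(rest) and not is_header(rest[j]):
--             j += 1
--         body, lines = rest[:j], rest[j:]
--         desc = ""
--         for line in body:
--             if line.strip() and not line.startswith("#"):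
--                 desc += line.strip() + " "
--         phases.append({"name": header.replace("###", "").strip(),
--                        "description": desc})
--     return phases or DEFAULT
-- ===== Notes on version B (the rewrite author's own statement) =====
-- stated objective: alternative
-- what changed: Replaces A's single stateful scan carrying a mutable current-phase accumulator with a grouping decomposition: drop the preamble before the first header, then repeatedly split off one header line and its following body block and build each phase dict from that block.
import Mathlib
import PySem

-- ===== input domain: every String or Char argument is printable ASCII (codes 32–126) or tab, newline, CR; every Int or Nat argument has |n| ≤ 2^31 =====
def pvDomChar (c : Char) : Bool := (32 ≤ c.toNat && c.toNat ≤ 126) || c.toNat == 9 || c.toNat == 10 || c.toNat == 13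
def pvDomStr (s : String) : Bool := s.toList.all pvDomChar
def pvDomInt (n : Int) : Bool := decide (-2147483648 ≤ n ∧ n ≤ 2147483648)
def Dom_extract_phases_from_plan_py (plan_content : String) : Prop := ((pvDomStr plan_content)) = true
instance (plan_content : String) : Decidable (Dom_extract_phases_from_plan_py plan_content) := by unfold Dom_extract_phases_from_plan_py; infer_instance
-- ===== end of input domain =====

-- B replaces A's single stateful scan (current-phase accumulator) by a grouping
-- decomposition: drop the preamble, then repeatedly split off one header and its
-- body block; objective: alternative (same cost, different structure).


-- shared text predicates (same expressions in both sources)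
def pvIsHeader (line : String) : Bool :=
  PySem.Str.isIn "### Phase" line || PySem.Str.isIn "### Step" line

def pvKeep (line : String) : Bool :=
  !(PySem.Str.strip line == "") && !(PySem.Str.startswith line "#")

def pvDefaultPhases : List (List (String × String)) :=
  [[("name", "Phase 1: Foundation"), ("description", "Set up project structure and dependencies")],
   [("name", "Phase 2: Core Implementation"), ("description", "Implement main features")],
   [("name", "Phase 3: Testing & Polish"), ("description", "Add tests and refine")]]

-- ===== PORT A =====
-- finish A's loop: append the pending current phase
def pvFin (st : List (List (String × String)) × Option (String × String)) :
    List (List (String × String)) :=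
  match st.2 with
  | some (n, d) => st.1 ++ [[("name", n), ("description", d)]]
  | none => st.1

-- one step of A's for-loop: state = (phases so far, current phase as (name, description))
def pvAStep (st : List (List (String × String)) × Option (String × String)) (line : String) :
    List (List (String × String)) × Option (String × String) :=
  if pvIsHeader line then
    let phases := match st.2 with
      | some (n, d) => st.1 ++ [[("name", n), ("description", d)]]
      | none => st.1
    (phases, some (PySem.Str.strip (PySem.Str.replace line "###" ""), ""))
  else
    match st.2 with
    | some (n, d) =>
        if pvKeep line then (st.1, some (n, d ++ PySem.Str.strip line ++ " ")) else st
    | none => st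

def extract_phases_from_plan_py (plan_content : String) : List (List (String × String)) :=
  let lines := (PySem.Str.split? plan_content "\n").getD []
  let phases := pvFin (lines.foldl pvAStep ([], none))
  if phases = [] then pvDefaultPhases else phases

-- ===== PORT B =====
-- Source B's inner description loop over one body block
def pvDescOf (body : List String) : String :=
  body.foldl (fun d line => if pvKeep line then d ++ PySem.Str.strip line ++ " " else d) ""

-- Source B's outer while-loop: the first line is a header; split off its body block
def pvGroups : List String → List (List (String × String))
  | [] => []
  | header :: rest =>
      [("name", PySem.Str.strip (PySem.Str.replace header "###" "")),
       ("description", pvDescOf (rest.takeWhile (fun l => !pvIsHeader l)))] ::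
        pvGroups (rest.dropWhile (fun l => !pvIsHeader l))
termination_by lines => lines.length
decreasing_by
  exact Nat.lt_succ_of_le (List.length_dropWhile_le _ _)

def extract_phases_from_plan_py_alt (plan_content : String) : List (List (String × String)) :=
  let lines := (PySem.Str.split? plan_content "\n").getD []
  let phases := pvGroups (lines.dropWhile (fun l => !pvIsHeader l))
  if phases = [] then pvDefaultPhases else phases

-- ===== PRECONDITION & SPEC =====
def Spec_extract_phases_from_plan_py (plan_content : String) (out : List (List (String × String))) : Prop := out = extract_phases_from_plan_py_alt plan_content
instance (plan_content : String) (out : List (List (String × String))) : Decidable (Spec_extract_phases_from_plan_py plan_content out) := by unfold Spec_extract_phases_from_plan_py; infer_instance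

-- ===== CLAIM (what is proved, stated in full; the proofs are below) =====
def Claim_equal_extract_phases_from_plan_py : Prop := ∀ (plan_content : String), Dom_extract_phases_from_plan_py plan_content → Spec_extract_phases_from_plan_py plan_content (extract_phases_from_plan_py plan_content)

-- ===== LEMMAS AND PROOFS =====

-- description accumulation starting from an arbitrary prefix d
def pvDescFrom (d : String) (body : List String) : String :=
  body.foldl (fun d line => if pvKeep line then d ++ PySem.Str.strip line ++ " " else d) d

-- A's loop from an open phase (n, d) = that phase closed over the block, then the groups
theorem pvA_some (lines : List String) :
    ∀ (acc : List (List (String × String))) (n d : String),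
      pvFin (lines.foldl pvAStep (acc, some (n, d))) =
        acc ++ [[("name", n), ("description", pvDescFrom d (lines.takeWhile (fun l => !pvIsHeader l)))]] ++
          pvGroups (lines.dropWhile (fun l => !pvIsHeader l)) := by
  induction lines with
  | nil => intro acc n d; simp [pvFin, pvDescFrom, pvGroups]
  | cons h rest ih =>
    intro acc n d
    by_cases hh : pvIsHeader h = true
    · rw [List.foldl_cons, List.takeWhile_cons, List.dropWhile_cons]
      simp only [pvAStep, hh, Bool.not_true, if_true]
      rw [pvGroups.eq_def]
      simp only [ih, pvDescOf]
      simp [pvDescFrom]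
    · rw [List.foldl_cons, List.takeWhile_cons, List.dropWhile_cons]
      simp only [pvAStep, hh, Bool.not_false, Bool.false_eq_true, if_false, if_true]
      by_cases hk : pvKeep h = true
      · rw [if_pos hk, ih]; simp [pvDescFrom, hk]
      · rw [if_neg hk, ih]; simp [pvDescFrom, hk]

-- A's loop from no open phase = the groups of the suffix starting at the first header
theorem pvA_none (lines : List String) :
    ∀ (acc : List (List (String × String))),
      pvFin (lines.foldl pvAStep (acc, none)) =
        acc ++ pvGroups (lines.dropWhile (fun l => !pvIsHeader l)) := by
  induction lines with
  | nil => intro acc; simp [pvFin, pvGroups]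
  | cons h rest ih =>
    intro acc
    by_cases hh : pvIsHeader h = true
    · rw [List.foldl_cons, List.dropWhile_cons]
      simp only [pvAStep, hh, Bool.not_true, if_true]
      rw [pvA_some]
      conv_rhs => rw [pvGroups.eq_def]
      simp [pvDescOf, pvDescFrom]
    · rw [List.foldl_cons, List.dropWhile_cons]
      simp only [pvAStep, hh, Bool.not_false, Bool.false_eq_true, if_false, if_true]
      exact ih acc

-- ===== VERDICT (by name: the statement is the Claim_ definition above) =====
theorem extract_phases_from_plan_py_spec : Claim_equal_extract_phases_from_plan_py := by
  intro plan_content _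
  show extract_phases_from_plan_py plan_content = extract_phases_from_plan_py_alt plan_content
  simp only [extract_phases_from_plan_py, extract_phases_from_plan_py_alt, pvA_none,
    List.nil_append]
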